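-- pv_equiv track=rewrite | github.com/seungjaeryanlee/sotarl | generate_md.py | split_entries_by_variants
-- ===== SOURCE A (Python) =====
-- def split_entries_by_variants(entries):
--     """Split entries by their variants."""
--     human_entries = []
--     noop_entries = []
--     unspecified_entries = []
--     for entry in entries:
--         if 'env-variant' not in entry:
--             unspecified_entries.append(entry)
--         elif entry['env-variant'] == 'Human start':
--             human_entries.append(entry)
--         elif entry['env-variant'] == 'No-op start':
--             noop_entries.append(entry)
--         else:
--             unspecified_entries.append(entry)
--
--     return human_entries, noop_entries, unspecified_entries
-- ===== SOURCE B (Python) =====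
-- def split_entries_by_variants(entries):
--     """Split entries by their variants."""
--     human_entries = [e for e in entries if e.get('env-variant') == 'Human start']
--     noop_entries = [e for e in entries if e.get('env-variant') == 'No-op start']
--     unspecified_entries = [e for e in entries
--                            if e.get('env-variant') not in ('Human start', 'No-op start')]
--     return human_entries, noop_entries, unspecified_entries
-- ===== Notes on version B (the rewrite author's own statement) =====
-- stated objective: idiomatic
-- what changed: Replaces the single dispatching loop with three accumulators by three independent filter passes (one list comprehension per result list) using dict.get.
import Mathlib
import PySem

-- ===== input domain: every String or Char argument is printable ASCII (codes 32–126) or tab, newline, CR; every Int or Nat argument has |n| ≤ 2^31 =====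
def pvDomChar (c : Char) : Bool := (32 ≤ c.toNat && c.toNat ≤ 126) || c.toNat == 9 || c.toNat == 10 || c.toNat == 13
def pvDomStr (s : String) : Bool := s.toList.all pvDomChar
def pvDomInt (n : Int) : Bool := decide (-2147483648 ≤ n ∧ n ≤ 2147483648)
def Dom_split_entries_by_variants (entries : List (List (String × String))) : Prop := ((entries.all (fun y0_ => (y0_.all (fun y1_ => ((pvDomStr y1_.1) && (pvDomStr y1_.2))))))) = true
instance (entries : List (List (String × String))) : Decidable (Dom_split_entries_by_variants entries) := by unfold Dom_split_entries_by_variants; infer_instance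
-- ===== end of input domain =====

-- B replaces A's single dispatching loop with three independent filter passes (one per result list); objective: idiomatic, same O(n) cost.

-- ===== PORT A =====
-- one step of A's loop: dispatch a single entry to one of the three accumulators
def pvStepA (acc : (List (List (String × String))) × (List (List (String × String))) × (List (List (String × String)))) (entry : List (String × String)) : (List (List (String × String))) × (List (List (String × String))) × (List (List (String × String))) :=
  if (PySem.Dict.mk entry).contains "env-variant" = false then
    (acc.1, acc.2.1, acc.2.2 ++ [entry])
  else if (PySem.Dict.mk entry).get? "env-variant" = some "Human start" then
    (acc.1 ++ [entry], acc.2.1, acc.2.2)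
  else if (PySem.Dict.mk entry).get? "env-variant" = some "No-op start" then
    (acc.1, acc.2.1 ++ [entry], acc.2.2)
  else
    (acc.1, acc.2.1, acc.2.2 ++ [entry])

def split_entries_by_variants (entries : List (List (String × String))) : (List (List (String × String))) × (List (List (String × String))) × (List (List (String × String))) :=
  entries.foldl pvStepA ([], [], [])

-- ===== PORT B =====
-- entry.get('env-variant')
def pvVariant (entry : List (String × String)) : Option String :=
  (PySem.Dict.mk entry).get? "env-variant"

def split_entries_by_variants_alt (entries : List (List (String × String))) : (List (List (String × String))) × (List (List (String × String))) × (List (List (String × String))) :=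
  ( entries.filter (fun e => pvVariant e = some "Human start")
  , entries.filter (fun e => pvVariant e = some "No-op start")
  , entries.filter (fun e => pvVariant e ≠ some "Human start" ∧ pvVariant e ≠ some "No-op start") )

-- ===== PRECONDITION & SPEC =====
def Spec_split_entries_by_variants (entries : List (List (String × String))) (out : (List (List (String × String))) × (List (List (String × String))) × (List (List (String × String)))) : Prop := out = split_entries_by_variants_alt entries
instance (entries : List (List (String × String))) (out : (List (List (String × String))) × (List (List (String × String))) × (List (List (String × String)))) : Decidable (Spec_split_entries_by_variants entries out) := by unfold Spec_split_entries_by_variants; infer_instance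

-- ===== CLAIM (what is proved, stated in full; the proofs are below) =====
def Claim_equal_split_entries_by_variants : Prop := ∀ (entries : List (List (String × String))), Dom_split_entries_by_variants entries → Spec_split_entries_by_variants entries (split_entries_by_variants entries)

-- ===== LEMMAS AND PROOFS =====

-- loop invariant: A's fold from an arbitrary state appends B's three filtered lists
theorem pvFold_invariant (entries : List (List (String × String))) :
    ∀ (h n u : List (List (String × String))),
      entries.foldl pvStepA (h, n, u) =
        ( h ++ entries.filter (fun e => pvVariant e = some "Human start")
        , n ++ entries.filter (fun e => pvVariant e = some "No-op start")
        , u ++ entries.filter (fun e => pvVariant e ≠ some "Human start" ∧ pvVariant e ≠ some "No-op start") ) := by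
  induction entries with
  | nil => intro h n u; simp
  | cons e rest ih =>
    intro h n u
    simp only [List.foldl_cons, List.filter_cons]
    by_cases hc : (PySem.Dict.mk e).contains "env-variant" = false
    · have hv : pvVariant e = none := by
        unfold pvVariant
        rw [PySem.Dict.get?_eq_none_iff_contains]
        exact hc
      simp [pvStepA, hc, hv, ih]
    · by_cases hH : pvVariant e = some "Human start"
      · simp [pvStepA, hc, pvVariant] at *
        simp [hH, ih]
      · by_cases hN : pvVariant e = some "No-op start"
        · simp [pvStepA, hc, pvVariant] at *
          simp [hN, ih]
        · simp [pvStepA, hc, pvVariant] at *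
          simp [hH, hN, ih]

-- ===== VERDICT (by name: the statement is the Claim_ definition above) =====
theorem split_entries_by_variants_spec : Claim_equal_split_entries_by_variants := by
  intro entries _
  show _ = _
  unfold split_entries_by_variants split_entries_by_variants_alt
  rw [pvFold_invariant entries [] [] []]
  simp
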